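-- pv_equiv track=rewrite | github.com/softmoca/Python_Algorithm_CodingTest | 입문자를 위힌 코딩테스트 핵심2/10. 상태 트리 레벨탐색(BFS)/기본 코드/2. 최소 점프.py | solution
-- ===== SOURCE A (Python) =====
-- from collections import deque
--
-- def solution(home):
--     answer = 0
--
--     ch=[0]*10001
--
--     dq=deque([0])
--     L=0
--     ch[0]=1
--     while dq:
--         for _ in range(len(dq)):
--             x=dq.popleft()
--             if x==home:
--                 answer=L
--                 return answer
--             for next in (x-1,x+1,x+5):
--                 if 0<=next<=10000 and ch[next]==0:
--                     dq.append(next)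
--                     ch[x]=1
--         L+=1
-- ===== SOURCE B (Python) =====
-- def solution(home):
--     # Closed form: with steps -1, +1, +5 from 0, reaching home = 5*q + r (0 <= r < 5)
--     # takes q fives plus r ones, or (q+1) fives plus (5-r) minus-ones.
--     q, r = divmod(home, 5)
--     return min(q + r, q + (6 - r))
-- ===== Notes on version B (the rewrite author's own statement) =====
-- stated objective: faster
-- what changed: Replaces the level-by-level BFS (whose broken visited-marking re-enqueues nodes combinatorially) by the O(1) closed form min(q+r, q+6-r) with q,r = divmod(home,5).
-- outside the precondition, e.g. on solution(-3): A does not finish within the time limit, B returns 1; on solution(10005): A does not finish within the time limit, B returns 2001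
import Mathlib
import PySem

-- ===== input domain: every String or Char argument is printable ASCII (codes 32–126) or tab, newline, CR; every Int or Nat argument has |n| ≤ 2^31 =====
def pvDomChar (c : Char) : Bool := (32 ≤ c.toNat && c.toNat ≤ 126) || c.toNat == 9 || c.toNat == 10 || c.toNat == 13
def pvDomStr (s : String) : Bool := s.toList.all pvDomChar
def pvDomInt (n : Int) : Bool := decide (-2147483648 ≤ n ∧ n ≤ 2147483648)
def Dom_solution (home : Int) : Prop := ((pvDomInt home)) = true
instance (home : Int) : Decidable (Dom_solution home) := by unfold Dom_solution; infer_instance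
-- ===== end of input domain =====

-- B replaces A's level BFS (broken visited-marking, combinatorial re-enqueueing) by the O(1)
-- closed form min(q+r, q+6-r), q,r = divmod(home,5); exact on 0 ≤ home ≤ 10000 where A returns.

-- ===== PORT A =====
-- ch ([0]*10001, written in place at indices A keeps in 0..10000) is an Array Int;
-- the deque is kept as (front, back): popleft = head of front, append = cons on back,
-- rejoined front ++ back.reverse when the level's len(dq) pops are done — exact for
-- A's access pattern (one level pops exactly the elements present at level start).

-- ch[next] read / ch[x]=1 write
def chG (ch : Array Int) (n : Int) : Int := (ch[n.toNat]?).getD 0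
def chS (ch : Array Int) (x : Int) : Array Int := ch.setIfInBounds x.toNat 1

-- 'if 0<=next<=10000 and ch[next]==0: dq.append(next); ch[x]=1'
def tryAdd (x : Int) (p : List Int × Array Int) (n : Int) : List Int × Array Int :=
  if 0 ≤ n ∧ n ≤ 10000 ∧ chG p.2 n = 0 then (n :: p.1, chS p.2 x) else p

-- 'for _ in range(len(dq)): x=dq.popleft(); …'  (k = len(dq) at loop entry)
def innerA (home : Int) (L : Int) :
    Nat → List Int → List Int → Array Int → Sum Int (List Int × Array Int)
  | 0, front, back, ch => .inr (front ++ back.reverse, ch)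
  | k+1, front, back, ch =>
    match front with
    | [] => .inr (back.reverse, ch)  -- unreachable: Python pops at most the initial length
    | x :: rest =>
      if x = home then .inl L
      else
        let p := tryAdd x (tryAdd x (tryAdd x (back, ch) (x-1)) (x+1)) (x+5)
        innerA home L k rest p.1 p.2

-- 'while dq: … ; L+=1'  (fuel bounds the number of levels; within Pre_ the return fires
--  at level ≤ 2004 < 20000, so the fuel guard only makes the same computation total)
def outerA (home : Int) : Nat → List Int → Array Int → Int → Int
  | 0, _, _, _ => 0
  | fuel+1, dq, ch, L =>
    if dq.isEmpty then 0  -- Python falls off the loop returning None; excluded by Pre_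
    else match innerA home L dq.length dq [] ch with
      | .inl ans => ans
      | .inr (dq', ch') => outerA home fuel dq' ch' (L+1)

def solution (home : Int) : Int :=
  outerA home 20000 [0] (chS (Array.replicate 10001 (0:Int)) 0) 0

-- ===== PORT B =====
def solution_alt (home : Int) : Int :=
  let q := PySem.Int.floordiv home 5
  let r := PySem.Int.mod home 5
  min (q + r) (q + (6 - r))

-- ===== PRECONDITION & SPEC =====
-- Pre_ excludes home outside [0,10000]: there A's queue can never contain home, the loop
-- saturates and falls off, returning None (no int) — and practically never terminates.
def Pre_solution (home : Int) : Prop := 0 ≤ home ∧ home ≤ 10000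
instance (home : Int) : Decidable (Pre_solution home) := by unfold Pre_solution; infer_instance
def pvWitness_solution : Int := 17

def Spec_solution (home : Int) (out : Int) : Prop := out = solution_alt home
instance (home : Int) (out : Int) : Decidable (Spec_solution home out) := by unfold Spec_solution; infer_instance

-- ===== CLAIM (what is proved, stated in full; the proofs are below) =====
def Claim_equal_solution : Prop := ∀ (home : Int), Dom_solution home → Pre_solution home → Spec_solution home (solution home)

-- ===== LEMMAS AND PROOFS =====

-- `fval x` is B's closed form, written with ediv/emod so that omega can work with it.
def fval (x : Int) : Int := min (x / 5 + x % 5) (x / 5 + (6 - x % 5))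

theorem solution_alt_eq_fval (x : Int) : solution_alt x = fval x := by
  unfold solution_alt fval
  rw [PySem.Int.floordiv_eq_ediv_of_pos (by norm_num), PySem.Int.mod_eq_emod_of_pos (by norm_num)]

theorem fval_char (x q r : Int) (hx : x = 5 * q + r) (h0 : 0 ≤ r) (h5 : r < 5) :
    fval x = q + min r (6 - r) := by
  unfold fval
  have hq : x / 5 = q := by omega
  have hr : x % 5 = r := by omega
  rw [hq, hr]; omega

-- the canonical shortest path: p 0 = 0, p (fval home) = home, consecutive values differ by a move
def pathP (home i : Int) : Int :=
  if home % 5 = 4 then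
    (if i ≤ home / 5 + 1 then 5 * i else 5 * (home / 5 + 1) - (i - (home / 5 + 1)))
  else (if i ≤ home / 5 then 5 * i else 5 * (home / 5) + (i - home / 5))

-- 1-Lipschitz of fval along moves, inside the board
theorem fval_lip (x n : Int) (hx0 : 0 ≤ x) (hn0 : 0 ≤ n)
    (hmov : n = x - 1 ∨ n = x + 1 ∨ n = x + 5) : fval n ≤ fval x + 1 := by
  obtain ⟨q, r, hx, h0, h5⟩ : ∃ q r, x = 5 * q + r ∧ 0 ≤ r ∧ r < 5 :=
    ⟨x / 5, x % 5, by omega, by omega, by omega⟩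
  have hfx := fval_char x q r hx h0 h5
  rcases hmov with h | h | h
  · by_cases hr : r = 0
    · have := fval_char n (q - 1) 4 (by omega) (by omega) (by omega); omega
    · have := fval_char n q (r - 1) (by omega) (by omega) (by omega); omega
  · by_cases hr : r = 4
    · have := fval_char n (q + 1) 0 (by omega) (by omega) (by omega); omega
    · have := fval_char n q (r + 1) (by omega) (by omega) (by omega); omega
  · have := fval_char n (q + 1) r (by omega) (by omega) (by omega); omega

theorem fval_nonneg (x : Int) (hx : 0 ≤ x) : 0 ≤ fval x := by
  unfold fval; omega

theorem fval_le (x : Int) (hx0 : 0 ≤ x) (hx1 : x ≤ 10000) : fval x ≤ 2004 := by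
  unfold fval; omega

theorem pathP_zero (home : Int) (h0 : 0 ≤ home) : pathP home 0 = 0 := by
  unfold pathP
  by_cases h : home % 5 = 4
  · rw [if_pos h, if_pos (by omega)]; ring
  · rw [if_neg h, if_pos (by omega)]; ring

theorem pathP_last (home : Int) (h0 : 0 ≤ home) (h1 : home ≤ 10000) :
    pathP home (fval home) = home := by
  have hfc := fval_char home (home / 5) (home % 5) (by omega) (by omega) (by omega)
  unfold pathP
  by_cases h : home % 5 = 4
  · rw [if_pos h, if_neg (by omega)]; omega
  · rw [if_neg h]
    by_cases hi : fval home ≤ home / 5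
    · rw [if_pos hi]; omega
    · rw [if_neg hi]; omega

theorem pathP_range (home i : Int) (h0 : 0 ≤ home) (h1 : home ≤ 10000)
    (hi0 : 0 ≤ i) (hid : i ≤ fval home) : 0 ≤ pathP home i ∧ pathP home i ≤ 10000 := by
  have hfc := fval_char home (home / 5) (home % 5) (by omega) (by omega) (by omega)
  unfold pathP
  by_cases h : home % 5 = 4
  · rw [if_pos h]
    by_cases hi : i ≤ home / 5 + 1
    · rw [if_pos hi]; omega
    · rw [if_neg hi]; omega
  · rw [if_neg h]
    by_cases hi : i ≤ home / 5
    · rw [if_pos hi]; omega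
    · rw [if_neg hi]; omega

theorem pathP_step (home i : Int) (h0 : 0 ≤ home) (h1 : home ≤ 10000)
    (hi0 : 0 ≤ i) (hid : i < fval home) :
    pathP home (i + 1) = pathP home i - 1 ∨ pathP home (i + 1) = pathP home i + 1 ∨
    pathP home (i + 1) = pathP home i + 5 := by
  have hfc := fval_char home (home / 5) (home % 5) (by omega) (by omega) (by omega)
  unfold pathP
  by_cases h : home % 5 = 4 <;> [rw [if_pos h, if_pos h]; rw [if_neg h, if_neg h]]
  · by_cases ha : i + 1 ≤ home / 5 + 1
    · rw [if_pos ha, if_pos (by omega)]; omega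
    · by_cases hb : i ≤ home / 5 + 1
      · rw [if_neg ha, if_pos hb]; omega
      · rw [if_neg ha, if_neg hb]; omega
  · by_cases ha : i + 1 ≤ home / 5
    · rw [if_pos ha, if_pos (by omega)]; omega
    · by_cases hb : i ≤ home / 5
      · rw [if_neg ha, if_pos hb]; omega
      · rw [if_neg ha, if_neg hb]; omega

theorem pathP_fval (home i : Int) (h0 : 0 ≤ home) (h1 : home ≤ 10000)
    (hi0 : 0 ≤ i) (hid : i ≤ fval home) : fval (pathP home i) = i := by
  have hfc := fval_char home (home / 5) (home % 5) (by omega) (by omega) (by omega)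
  unfold pathP
  by_cases h : home % 5 = 4
  · rw [if_pos h]
    by_cases hi : i ≤ home / 5 + 1
    · rw [if_pos hi]
      have := fval_char (5 * i) i 0 (by ring) (by omega) (by omega); omega
    · rw [if_neg hi]
      have := fval_char (5 * (home / 5 + 1) - (i - (home / 5 + 1))) (home / 5)
        (5 * (home / 5 + 1) - (i - (home / 5 + 1)) - 5 * (home / 5)) (by ring) (by omega) (by omega)
      omega
  · rw [if_neg h]
    by_cases hi : i ≤ home / 5
    · rw [if_pos hi]
      have := fval_char (5 * i) i 0 (by ring) (by omega) (by omega); omega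
    · rw [if_neg hi]
      have := fval_char (5 * (home / 5) + (i - home / 5)) (home / 5) (i - home / 5)
        (by ring) (by omega) (by omega)
      omega

-- ch helper facts
theorem chG_chS_ne (ch : Array Int) (x n : Int) (hx : 0 ≤ x) (hn : 0 ≤ n) (hne : n ≠ x) :
    chG (chS ch x) n = chG ch n := by
  unfold chG chS
  have hne' : x.toNat ≠ n.toNat := by omega
  rw [Array.getElem?_setIfInBounds, if_neg hne']

theorem chG_chS (ch : Array Int) (x z : Int) (hx : 0 ≤ x) (hz : 0 ≤ z)
    (h : chG (chS ch x) z ≠ 0) : chG ch z ≠ 0 ∨ z = x := by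
  by_cases hzx : z = x
  · exact Or.inr hzx
  · rw [chG_chS_ne ch x z hx hz hzx] at h; exact Or.inl h

-- tryAdd helper facts
theorem tryAdd_fst (x : Int) (p : List Int × Array Int) (n : Int) :
    ∃ app, (tryAdd x p n).1 = app ++ p.1 ∧ ∀ m ∈ app, m = n ∧ 0 ≤ m ∧ m ≤ 10000 := by
  unfold tryAdd; split
  · next h => exact ⟨[n], rfl, by simpa using ⟨h.1, h.2.1⟩⟩
  · exact ⟨[], by simp, by simp⟩

theorem tryAdd_snd (x : Int) (p : List Int × Array Int) (n z : Int) (hx : 0 ≤ x) (hz : 0 ≤ z)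
    (hzn : (tryAdd x p n).2 = chS p.2 x ∨ (tryAdd x p n).2 = p.2)
    (h : chG (tryAdd x p n).2 z ≠ 0) : chG p.2 z ≠ 0 ∨ z = x := by
  rcases hzn with he | he
  · rw [he] at h; exact chG_chS p.2 x z hx hz h
  · rw [he] at h; exact Or.inl h

theorem tryAdd_snd_cases (x : Int) (p : List Int × Array Int) (n : Int) :
    (tryAdd x p n).2 = chS p.2 x ∨ (tryAdd x p n).2 = p.2 := by
  unfold tryAdd; split
  · exact Or.inl rfl
  · exact Or.inr rfl

theorem tryAdd_snd_ne (x : Int) (p : List Int × Array Int) (n z : Int)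
    (hx : 0 ≤ x) (hz : 0 ≤ z) (hzx : z ≠ x) : chG (tryAdd x p n).2 z = chG p.2 z := by
  rcases tryAdd_snd_cases x p n with he | he <;> rw [he]
  exact chG_chS_ne p.2 x z hx hz hzx

theorem tryAdd_mem (x : Int) (p : List Int × Array Int) (n : Int)
    (h0 : 0 ≤ n) (h1 : n ≤ 10000) (hch : chG p.2 n = 0) : n ∈ (tryAdd x p n).1 := by
  unfold tryAdd; rw [if_pos ⟨h0, h1, hch⟩]; simp

theorem tryAdd_mem_mono (x : Int) (p : List Int × Array Int) (n m : Int)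
    (hm : m ∈ p.1) : m ∈ (tryAdd x p n).1 := by
  obtain ⟨app, ha, -⟩ := tryAdd_fst x p n
  rw [ha]; exact List.mem_append_right _ hm

-- the three-neighbour chain of tryAdds
theorem chain_fst (x : Int) (back : List Int) (ch : Array Int) :
    ∃ app, (tryAdd x (tryAdd x (tryAdd x (back, ch) (x-1)) (x+1)) (x+5)).1 = app ++ back ∧
      ∀ m ∈ app, (m = x - 1 ∨ m = x + 1 ∨ m = x + 5) ∧ 0 ≤ m ∧ m ≤ 10000 := by
  obtain ⟨a1, h1, m1⟩ := tryAdd_fst x (back, ch) (x-1)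
  obtain ⟨a2, h2, m2⟩ := tryAdd_fst x (tryAdd x (back, ch) (x-1)) (x+1)
  obtain ⟨a3, h3, m3⟩ := tryAdd_fst x (tryAdd x (tryAdd x (back, ch) (x-1)) (x+1)) (x+5)
  refine ⟨a3 ++ a2 ++ a1, by simp [h3, h2, h1], ?_⟩
  intro m hm
  rcases List.mem_append.1 hm with hm | hm
  · rcases List.mem_append.1 hm with hm | hm
    · obtain ⟨he, hr⟩ := m3 m hm; exact ⟨Or.inr (Or.inr he), hr⟩
    · obtain ⟨he, hr⟩ := m2 m hm; exact ⟨Or.inr (Or.inl he), hr⟩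
  · obtain ⟨he, hr⟩ := m1 m hm; exact ⟨Or.inl he, hr⟩

theorem chain_snd (x : Int) (back : List Int) (ch : Array Int) (z : Int) (hx : 0 ≤ x) (hz : 0 ≤ z)
    (h : chG (tryAdd x (tryAdd x (tryAdd x (back, ch) (x-1)) (x+1)) (x+5)).2 z ≠ 0) :
    chG ch z ≠ 0 ∨ z = x := by
  rcases tryAdd_snd _ _ _ _ hx hz (tryAdd_snd_cases _ _ _) h with h' | h'
  · rcases tryAdd_snd _ _ _ _ hx hz (tryAdd_snd_cases _ _ _) h' with h'' | h''
    · exact tryAdd_snd _ _ _ _ hx hz (tryAdd_snd_cases _ _ _) h''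
    · exact Or.inr h''
  · exact Or.inr h'

-- an unmarked in-range neighbour of x gets enqueued by the chain
theorem chain_mem (x : Int) (back : List Int) (ch : Array Int) (n : Int)
    (hmov : n = x - 1 ∨ n = x + 1 ∨ n = x + 5) (hnx : n ≠ x) (hx0 : 0 ≤ x)
    (h0 : 0 ≤ n) (h1 : n ≤ 10000) (hch : chG ch n = 0) :
    n ∈ (tryAdd x (tryAdd x (tryAdd x (back, ch) (x-1)) (x+1)) (x+5)).1 := by
  have e1 : chG (tryAdd x (back, ch) (x-1)).2 n = chG ch n :=
    tryAdd_snd_ne x _ _ n hx0 h0 hnx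
  have e2 : chG (tryAdd x (tryAdd x (back, ch) (x-1)) (x+1)).2 n =
      chG (tryAdd x (back, ch) (x-1)).2 n := tryAdd_snd_ne x _ _ n hx0 h0 hnx
  rcases hmov with h | h | h
  · subst h
    exact tryAdd_mem_mono _ _ _ _ (tryAdd_mem_mono _ _ _ _
      (tryAdd_mem x (back, ch) _ h0 h1 hch))
  · subst h
    exact tryAdd_mem_mono _ _ _ _ (tryAdd_mem x _ _ h0 h1 (by rw [e1]; exact hch))
  · subst h
    exact tryAdd_mem x _ _ h0 h1 (by rw [e2, e1]; exact hch)

-- the big inner-loop lemma: while below level d, nobody is home, the queue invariants are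
-- maintained, unprocessed and already-appended elements persist, and every undiscovered
-- neighbour at level L+1 of a processed node gets enqueued.
theorem innerA_spec (home : Int) (h0 : 0 ≤ home) (h1 : home ≤ 10000) (L : Int)
    (hL : L < fval home) :
    ∀ (k : Nat) (front back : List Int) (ch : Array Int), k ≤ front.length →
    (∀ x ∈ front.take k, 0 ≤ x ∧ x ≤ 10000 ∧ fval x ≤ L) →
    (∀ x ∈ front.drop k, 0 ≤ x ∧ x ≤ 10000 ∧ fval x ≤ L + 1) →
    (∀ x ∈ back, 0 ≤ x ∧ x ≤ 10000 ∧ fval x ≤ L + 1) →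
    (∀ z, 0 ≤ z → chG ch z ≠ 0 → fval z ≤ L) →
    ∃ dq' ch', innerA home L k front back ch = .inr (dq', ch') ∧
      (∀ x ∈ dq', 0 ≤ x ∧ x ≤ 10000 ∧ fval x ≤ L + 1) ∧
      (∀ z, 0 ≤ z → chG ch' z ≠ 0 → fval z ≤ L) ∧
      (∀ y ∈ front.drop k, y ∈ dq') ∧
      (∀ y ∈ back, y ∈ dq') ∧
      (∀ x ∈ front.take k, ∀ n, (n = x - 1 ∨ n = x + 1 ∨ n = x + 5) →
        0 ≤ n → n ≤ 10000 → fval n = L + 1 → n ∈ dq') := by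
  intro k
  induction k with
  | zero =>
    intro front back ch _ _ hdrop hback hch
    refine ⟨front ++ back.reverse, ch, rfl, ?_, hch, ?_, ?_, by simp⟩
    · intro y hy
      rcases List.mem_append.1 hy with hy | hy
      · exact hdrop y (by simpa using hy)
      · exact hback y (by simpa using hy)
    · intro y hy; exact List.mem_append_left _ (by simpa using hy)
    · intro y hy; exact List.mem_append_right _ (by simpa using hy)
  | succ k ih =>
    intro front back ch hk htake hdrop hback hch
    match front with
    | [] => simp at hk
    | x :: rest =>
      have hkr : k ≤ rest.length := by simpa using hk
      have hxtk : x ∈ (x :: rest).take (k+1) := by simp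
      obtain ⟨hx0, hx1, hxL⟩ := htake x hxtk
      have hxh : x ≠ home := by
        intro h; rw [h] at hxL; omega
      obtain ⟨app, happ, hmapp⟩ := chain_fst x back ch
      have hch' : ∀ z, 0 ≤ z →
          chG (tryAdd x (tryAdd x (tryAdd x (back, ch) (x-1)) (x+1)) (x+5)).2 z ≠ 0 →
          fval z ≤ L := by
        intro z hz0 hz
        rcases chain_snd x back ch z hx0 hz0 hz with h | h
        · exact hch z hz0 h
        · rw [h]; exact hxL
      obtain ⟨dq', ch', hrun, c1, c2, c3, c4, c5⟩ :=
        ih rest (tryAdd x (tryAdd x (tryAdd x (back, ch) (x-1)) (x+1)) (x+5)).1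
          (tryAdd x (tryAdd x (tryAdd x (back, ch) (x-1)) (x+1)) (x+5)).2 hkr
          (fun y hy => htake y (by simp [List.take_succ_cons]; exact Or.inr hy))
          (fun y hy => hdrop y (by simpa using hy))
          (by
            rw [happ]; intro y hy
            rcases List.mem_append.1 hy with hy | hy
            · obtain ⟨hmov, hy0, hy1⟩ := hmapp y hy
              exact ⟨hy0, hy1, le_trans (fval_lip x y hx0 hy0 hmov) (by omega)⟩
            · exact hback y hy)
          hch'
      refine ⟨dq', ch', ?_, c1, c2, ?_, ?_, ?_⟩
      · simpa [innerA, if_neg hxh] using hrun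
      · intro y hy; exact c3 y (by simpa using hy)
      · intro y hy; exact c4 y (by rw [happ]; exact List.mem_append_right _ hy)
      · intro x' hx' n hmov hn0 hn1 hfn
        rcases (by simpa [List.take_succ_cons] using hx' : x' = x ∨ x' ∈ rest.take k) with he | he
        · subst he
          have hnx : n ≠ x' := by intro h; rw [h] at hfn; omega
          have hchn : chG ch n = 0 := by
            by_contra h
            have := hch n hn0 h; omega
          exact c4 n (chain_mem x' back ch n hmov hnx hx0 hn0 hn1 hchn)
        · exact c5 x' he n hmov hn0 hn1 hfn

-- if home sits among the first k elements of the front, the inner loop returns L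
theorem innerA_finds (home L : Int) :
    ∀ (k : Nat) (front back : List Int) (ch : Array Int), k ≤ front.length →
    home ∈ front.take k → innerA home L k front back ch = .inl L := by
  intro k
  induction k with
  | zero => intro front back ch _ h; simp at h
  | succ k ih =>
    intro front back ch hk hmem
    match front with
    | [] => simp at hk
    | x :: rest =>
      by_cases hx : x = home
      · simp [innerA, hx]
      · have hkr : k ≤ rest.length := by simpa using hk
        have hm : home ∈ rest.take k := by
          simp [List.take_succ_cons] at hmem
          tauto
        have := ih rest (tryAdd x (tryAdd x (tryAdd x (back, ch) (x-1)) (x+1)) (x+5)).1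
          (tryAdd x (tryAdd x (tryAdd x (back, ch) (x-1)) (x+1)) (x+5)).2 hkr hm
        simpa [innerA, if_neg hx] using this

theorem outerA_spec (home : Int) (h0 : 0 ≤ home) (h1 : home ≤ 10000) :
    ∀ (fuel : Nat) (L : Int) (dq : List Int) (ch : Array Int),
    0 ≤ L → L ≤ fval home → (fval home - L).toNat < fuel →
    (∀ x ∈ dq, 0 ≤ x ∧ x ≤ 10000 ∧ fval x ≤ L) →
    (∀ z, 0 ≤ z → chG ch z ≠ 0 → fval z ≤ L) →
    pathP home L ∈ dq →
    outerA home fuel dq ch L = fval home := by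
  intro fuel
  induction fuel with
  | zero => intro L dq ch _ _ hf; omega
  | succ fuel ih =>
    intro L dq ch hL0 hLd hf hdq hch hpath
    have hne : dq ≠ [] := by intro h; rw [h] at hpath; simp at hpath
    rw [outerA, if_neg (by simpa [List.isEmpty_iff] using hne)]
    rcases eq_or_lt_of_le hLd with heq | hlt
    · have hhome : home ∈ dq.take dq.length := by
        rw [List.take_length]; rw [heq, pathP_last home h0 h1] at hpath; exact hpath
      rw [innerA_finds home L dq.length dq [] ch le_rfl hhome, heq]
    · obtain ⟨dq', ch', hrun, hinv1, hinv2, -, -, hadd⟩ :=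
        innerA_spec home h0 h1 L hlt dq.length dq [] ch le_rfl
          (by simpa using hdq) (by simp) (by simp) hch
      rw [hrun]
      exact ih (L+1) dq' ch' (by omega) (by omega) (by omega) hinv1
        (fun z hz0 hz => by have := hinv2 z hz0 hz; omega)
        (by
          have hp := hadd (pathP home L) (by simpa using hpath) (pathP home (L+1))
          have hstep := pathP_step home L h0 h1 hL0 hlt
          have hrange := pathP_range home (L+1) h0 h1 (by omega) (by omega)
          have hfv := pathP_fval home (L+1) h0 h1 (by omega) (by omega)
          exact hp (by tauto) hrange.1 hrange.2 hfv)

-- ===== VERDICT (by name: the statement is the Claim_ definition above) =====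
theorem solution_spec : Claim_equal_solution := by
  intro home _ hpre
  obtain ⟨h0, h1⟩ := hpre
  unfold Spec_solution solution
  rw [solution_alt_eq_fval]
  apply outerA_spec home h0 h1 20000 0 _ _ (le_refl 0) (fval_nonneg home h0)
  · have := fval_le home h0 h1; omega
  · intro x hx; simp at hx; subst hx
    exact ⟨le_refl 0, by norm_num, by unfold fval; omega⟩
  · intro z hz0 hz
    by_cases h : z = 0
    · subst h; unfold fval; omega
    · exfalso
      apply hz
      unfold chG chS
      have hz' : (0:Int).toNat ≠ z.toNat := by omega
      rw [Array.getElem?_setIfInBounds, if_neg hz', Array.getElem?_replicate]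
      split <;> rfl
  · rw [pathP_zero home h0]; simp
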